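-- pv_equiv track=rewrite | github.com/parasiitism/AlgoDaily | glassdoor/facebook/facebookrecruiting/seating-arrangements/main.py | minOverallAwkwardness
-- ===== SOURCE A (Python) =====
-- def minOverallAwkwardness(arr):
--     arr.sort()
--     numsAtEvenIdx = arr[::2]
--     numsAtOddIdx = arr[1::2]
--     arr = numsAtEvenIdx + numsAtOddIdx[::-1]
--     res = abs(arr[-1] - arr[0])
--     for i in range(1, len(arr)):
--         res = max(res, abs(arr[i] - arr[i-1]))
--     return res
-- ===== SOURCE B (Python) =====
-- def minOverallAwkwardness(arr):
--     arr.sort()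
--     if len(arr) < 2:
--         return abs(arr[-1] - arr[0])
--     res = max(arr[1] - arr[0], arr[-1] - arr[-2])
--     for i in range(2, len(arr)):
--         res = max(res, arr[i] - arr[i - 2])
--     return res
-- ===== Notes on version B (the rewrite author's own statement) =====
-- stated objective: simpler
-- what changed: Instead of materializing the zigzag arrangement (even-index slice + reversed odd-index slice) and scanning its adjacent absolute differences, B reads the answer off the sorted array directly in one pass: the maximum of the first-pair gap, the last-pair gap, and all stride-2 gaps arr[i]-arr[i-2].
import Mathlib
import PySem

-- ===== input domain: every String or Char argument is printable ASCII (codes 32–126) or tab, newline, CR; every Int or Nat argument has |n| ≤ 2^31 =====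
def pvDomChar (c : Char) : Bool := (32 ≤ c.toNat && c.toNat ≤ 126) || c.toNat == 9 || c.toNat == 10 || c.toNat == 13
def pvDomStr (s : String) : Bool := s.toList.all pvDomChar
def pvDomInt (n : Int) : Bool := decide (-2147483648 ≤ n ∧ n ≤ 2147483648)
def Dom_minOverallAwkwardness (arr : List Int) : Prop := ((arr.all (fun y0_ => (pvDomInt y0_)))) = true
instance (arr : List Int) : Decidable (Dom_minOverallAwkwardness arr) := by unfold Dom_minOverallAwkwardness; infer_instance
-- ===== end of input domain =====

-- B computes the same maximum directly from the sorted array (first-pair gap, last-pair gap,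
-- stride-2 gaps) instead of materializing the zigzag arrangement; objective: simpler.
-- Both A and B sort the argument list in place (the same observable mutation); the equivalence
-- proved here is about the return value.

-- ===== PORT A =====
def minOverallAwkwardness (arr : List Int) : Int :=
  let arrS := PySem.List.sorted arr (fun x => x)
  let numsAtEvenIdx := (PySem.List.slice? arrS none none 2).getD []
  let numsAtOddIdx := (PySem.List.slice? arrS (some 1) none 2).getD []
  let arr2 := numsAtEvenIdx ++ ((PySem.List.slice? numsAtOddIdx none none (-1)).getD [])
  let res := |PySem.List.pyGetD arr2 (-1) 0 - PySem.List.pyGetD arr2 0 0|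
  (PySem.List.pyRange 1 (arr2.length) 1).foldl
    (fun res i => max res |PySem.List.pyGetD arr2 i 0 - PySem.List.pyGetD arr2 (i - 1) 0|) res

-- ===== PORT B =====
def minOverallAwkwardness_alt (arr : List Int) : Int :=
  let arrS := PySem.List.sorted arr (fun x => x)
  if arrS.length < 2 then
    |PySem.List.pyGetD arrS (-1) 0 - PySem.List.pyGetD arrS 0 0|
  else
    let res := max (PySem.List.pyGetD arrS 1 0 - PySem.List.pyGetD arrS 0 0)
                   (PySem.List.pyGetD arrS (-1) 0 - PySem.List.pyGetD arrS (-2) 0)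
    (PySem.List.pyRange 2 (arrS.length) 1).foldl
      (fun res i => max res (PySem.List.pyGetD arrS i 0 - PySem.List.pyGetD arrS (i - 2) 0)) res

-- ===== PRECONDITION & SPEC =====
-- Python A raises IndexError on the empty list (arr[-1]); Pre_ excludes exactly that input.
def Pre_minOverallAwkwardness (arr : List Int) : Prop := arr ≠ []
instance (arr : List Int) : Decidable (Pre_minOverallAwkwardness arr) := by
  unfold Pre_minOverallAwkwardness; infer_instance
def pvWitness_minOverallAwkwardness : List Int := [3, 1, 2]

def Spec_minOverallAwkwardness (arr : List Int) (out : Int) : Prop := out = minOverallAwkwardness_alt arr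
instance (arr : List Int) (out : Int) : Decidable (Spec_minOverallAwkwardness arr out) := by unfold Spec_minOverallAwkwardness; infer_instance

-- ===== CLAIM (what is proved, stated in full; the proofs are below) =====
def Claim_equal_minOverallAwkwardness : Prop := ∀ (arr : List Int), Dom_minOverallAwkwardness arr → Pre_minOverallAwkwardness arr → Spec_minOverallAwkwardness arr (minOverallAwkwardness arr)

-- ===== LEMMAS AND PROOFS =====

-- every other element, starting at the head ( = xs[::2] )
def eo : List Int → List Int
  | [] => [] | [a] => [a] | a :: _ :: t => a :: eo t

-- the zigzag arrangement A builds: evens ascending, then odds descending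
def zig : List Int → List Int
  | [] => [] | [a] => [a] | a :: b :: t => a :: (zig t ++ [b])

-- absolute adjacent differences
def adjD : List Int → List Int
  | a :: b :: t => |b - a| :: adjD (b :: t)
  | _ => []

-- stride-2 differences s[i+2] - s[i]
def strideD : List Int → List Int
  | a :: b :: c :: t => (c - a) :: strideD (b :: c :: t)
  | _ => []

-- last-pair difference s[-1] - s[-2] (0 if fewer than two elements)
def lastD : List Int → Int
  | [a, b] => b - a
  | _ :: b :: c :: t => lastD (b :: c :: t)
  | _ => 0

theorem eo_cons (x : Int) (r : List Int) : eo (x :: r) = x :: eo r.tail := by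
  cases r <;> simp [eo]

theorem filterMap_even (t : List Int) :
    List.filterMap (fun x : Nat => t[(2 * (x : Int)).toNat]?)
      (List.range (((t.length : Int) + 1) / 2).toNat) = eo t := by
  induction t using eo.induct with
  | case1 => rfl
  | case2 a => norm_num [List.range_succ, eo]; rfl
  | case3 a b t ih =>
    have h2 : ((((a :: b :: t).length : Int) + 1) / 2).toNat
        = (((t.length : Int) + 1) / 2).toNat + 1 := by simp; omega
    rw [h2, List.range_succ_eq_map, List.filterMap_cons, List.filterMap_map]
    have h3 : (fun (x : Nat) => (a :: b :: t)[(2 * (x.succ : Int)).toNat]?)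
        = fun (x : Nat) => t[(2 * (x : Int)).toNat]? := by
      funext x
      rw [show ((2 * (x.succ : Int))).toNat = 2 * x + 2 by push_cast; omega,
        show ((2 * (x : Int))).toNat = 2 * x by omega]
      simp
    simp only [Function.comp_def, h3]
    simp [ih, eo]

theorem slice_even (s : List Int) : (PySem.List.slice? s none none 2).getD [] = eo s := by
  have h := filterMap_even s
  simp only [PySem.List.slice?, PySem.List.sliceIndices] at *
  norm_num
  have h1 : (if 0 < s.length then (((s.length : Int) + 2 - 1) / 2).toNat else 0)
      = (((s.length : Int) + 1) / 2).toNat := by split <;> omega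
  rw [h1]
  exact h

theorem slice_odd (s : List Int) : (PySem.List.slice? s (some 1) none 2).getD [] = eo s.tail := by
  cases s with
  | nil => rfl
  | cons a r =>
    have h := filterMap_even r
    simp only [PySem.List.slice?, PySem.List.sliceIndices] at *
    norm_num
    have h1 : (if 0 < r.length then (((r.length : Int) + 2 - 1) / 2).toNat else 0)
        = (((r.length : Int) + 1) / 2).toNat := by split <;> omega
    rw [h1]
    have h3 : (fun x : Nat => (a :: r)[(1 + 2 * (x : Int)).toNat]?)
        = fun x : Nat => r[(2 * (x : Int)).toNat]? := by
      funext x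
      rw [show (1 + 2 * (x : Int)).toNat = 2 * x + 1 by omega,
        show (2 * (x : Int)).toNat = 2 * x by omega]
      simp
    rw [h3, h]

-- the zigzag arrangement in recursive form
theorem zig_eq (s : List Int) : eo s ++ (eo s.tail).reverse = zig s := by
  induction s using eo.induct with
  | case1 => rfl
  | case2 a => norm_num [List.range_succ, eo]; rfl
  | case3 a b t ih =>
    rw [show (a :: b :: t).tail = b :: t from rfl, eo_cons b t, eo_cons a (b :: t)]
    simp only [List.tail_cons, List.reverse_cons, zig, ← ih]
    simp

theorem adjD_append_singleton (l : List Int) (y : Int) (h : l ≠ []) :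
    adjD (l ++ [y]) = adjD l ++ [|y - l.getLast h|] := by
  induction l with
  | nil => simp at h
  | cons x r ih =>
    cases r with
    | nil => simp [adjD]
    | cons z u =>
      rw [List.cons_append, List.cons_append]
      rw [show adjD (x :: z :: (u ++ [y])) = |z - x| :: adjD (z :: (u ++ [y])) from rfl]
      rw [← List.cons_append, ih (by simp)]
      simp [adjD, List.getLast_cons]

theorem zig_cons_eq (c : Int) (t : List Int) : ∃ r, zig (c :: t) = c :: r := by
  cases t <;> exact ⟨_, rfl⟩

theorem key_perm (s : List Int) : ∀ a b, (a :: b :: s).Pairwise (· ≤ ·) →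
    (adjD (zig (a :: b :: s))).Perm (lastD (a :: b :: s) :: strideD (a :: b :: s)) := by
  induction s using eo.induct with
  | case1 =>
    intro a b h
    simp only [List.pairwise_cons] at h
    have hab : a ≤ b := by simpa using h.1
    simp [zig, adjD, strideD, lastD, abs_of_nonneg (by omega : (0:Int) ≤ b - a)]
  | case2 c =>
    intro a b h
    simp only [List.pairwise_cons] at h
    have hac : a ≤ c := by simp at h; omega
    have hbc : b ≤ c := by simp at h; omega
    have h1 : adjD (zig [a, b, c]) = [c - a, c - b] := by
      simp [zig, adjD, abs_of_nonneg (by omega : (0:Int) ≤ c - a),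
        abs_of_nonpos (by omega : b - c ≤ 0)]
    have h2 : lastD [a, b, c] :: strideD [a, b, c] = [c - b, c - a] := rfl
    rw [h1, h2]
    exact List.Perm.swap _ _ _
  | case3 c d u ih =>
    intro a b h
    have hz : zig (a :: b :: c :: d :: u) = a :: (zig (c :: d :: u) ++ [b]) := rfl
    obtain ⟨r, hr⟩ := zig_cons_eq c (d :: u)
    have hlast : (zig (c :: d :: u)).getLast (by simp [zig]) = d := by simp [zig]
    have hac : a ≤ c := by
      simp only [List.pairwise_cons] at h; have := h.1; simp at this; omega
    have hbd : b ≤ d := by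
      simp only [List.pairwise_cons] at h; have := h.2.1; simp at this; omega
    have step1 : adjD (zig (a :: b :: c :: d :: u))
        = (c - a) :: (adjD (zig (c :: d :: u)) ++ [d - b]) := by
      rw [hz, hr, List.cons_append]
      rw [show adjD (a :: c :: (r ++ [b])) = |c - a| :: adjD (c :: (r ++ [b])) from rfl]
      rw [← List.cons_append, ← hr, adjD_append_singleton _ _ (by simp [zig]), hlast]
      rw [abs_of_nonneg (by omega : (0:Int) ≤ c - a),
        abs_of_nonpos (by omega : b - d ≤ 0)]
      simp
    have hp : (c :: d :: u).Pairwise (· ≤ ·) :=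
      h.sublist (by simp : (c :: d :: u).Sublist (a :: b :: c :: d :: u))
    have ihp := ih c d hp
    have hstride : strideD (a :: b :: c :: d :: u) = (c - a) :: (d - b) :: strideD (c :: d :: u) := rfl
    have hlastD : lastD (a :: b :: c :: d :: u) = lastD (c :: d :: u) := rfl
    rw [step1, hstride, hlastD]
    rw [← Multiset.coe_eq_coe] at ihp ⊢
    simp only [← Multiset.cons_coe, ← Multiset.coe_add, ← Multiset.singleton_add,
      Multiset.coe_nil, add_zero] at ihp ⊢
    rw [ihp]
    abel

theorem length_adjD (z : List Int) : (adjD z).length = z.length - 1 := by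
  induction z with
  | nil => rfl
  | cons x r ih => cases r with
    | nil => rfl
    | cons y u => simp [adjD] at *; omega

theorem getD_adjD (z : List Int) : ∀ k, k < z.length - 1 →
    (adjD z).getD k 0 = |z.getD (k+1) 0 - z.getD k 0| := by
  induction z with
  | nil => intro k h; simp at h
  | cons x r ih =>
    cases r with
    | nil => intro k h; simp at h
    | cons y u =>
      intro k h
      cases k with
      | zero => simp [adjD]
      | succ m =>
        have := ih m (by simp at h ⊢; omega)
        simpa [adjD] using this

theorem adjD_eq_map (z : List Int) :
    adjD z = (List.range (z.length - 1)).map (fun k => |z.getD (k+1) 0 - z.getD k 0|) := by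
  apply List.ext_getElem
  · simp [length_adjD]
  · intro k h1 h2
    have hk : k < z.length - 1 := by simpa [length_adjD] using h1
    have := getD_adjD z k hk
    rw [List.getD_eq_getElem _ _ h1] at this
    simp [this]

theorem length_strideD (s : List Int) : (strideD s).length = s.length - 2 := by
  induction s using strideD.induct with
  | case1 a b c t ih => simp [strideD] at *; omega
  | case2 s h => cases s with
    | nil => rfl
    | cons x r => cases r with
      | nil => rfl
      | cons y u => cases u with
        | nil => rfl
        | cons z v => exact absurd rfl (h x y z v)

theorem getD_strideD (s : List Int) : ∀ k, k < s.length - 2 →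
    (strideD s).getD k 0 = s.getD (k+2) 0 - s.getD k 0 := by
  induction s with
  | nil => intro k h; simp at h
  | cons x r ih =>
    cases r with
    | nil => intro k h; simp at h
    | cons y u =>
      cases u with
      | nil => intro k h; simp at h
      | cons z v =>
        intro k h
        cases k with
        | zero => simp [strideD]
        | succ m =>
          have := ih m (by simp at h ⊢; omega)
          simpa [strideD] using this

theorem strideD_eq_map (s : List Int) :
    strideD s = (List.range (s.length - 2)).map (fun k => s.getD (k+2) 0 - s.getD k 0) := by
  apply List.ext_getElem
  · simp [length_strideD]
  · intro k h1 h2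
    have hk : k < s.length - 2 := by simpa [length_strideD] using h1
    have := getD_strideD s k hk
    rw [List.getD_eq_getElem _ _ h1] at this
    simp [this]

theorem lastD_eq (s : List Int) : 2 ≤ s.length →
    lastD s = s.getD (s.length - 1) 0 - s.getD (s.length - 2) 0 := by
  induction s using lastD.induct with
  | case1 a b => intro _; simp [lastD]
  | case2 x b c t ih => intro _; simp [lastD, ih (by simp)]; rfl
  | case3 t hx1 hx2 =>
    intro h
    rcases t with _ | ⟨a, _ | ⟨b, _ | ⟨c, u⟩⟩⟩
    · simp at h
    · simp at h
    · exact absurd rfl (hx1 a b)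
    · exact absurd rfl (hx2 a b c u)

theorem loopA (z : List Int) (r : Int) :
    (PySem.List.pyRange 1 (z.length : Int) 1).foldl
      (fun res i => max res |PySem.List.pyGetD z i 0 - PySem.List.pyGetD z (i - 1) 0|) r
    = (adjD z).foldl max r := by
  rw [PySem.List.pyRange_one, List.foldl_map, adjD_eq_map, List.foldl_map]
  have hn : ((z.length : Int) - 1).toNat = z.length - 1 := by omega
  rw [hn]
  congr 1
  funext acc k
  have e1 : (1 : Int) + (k : Int) = ((k + 1 : Nat) : Int) := by omega
  have e2 : (1 : Int) + (k : Int) - 1 = ((k : Nat) : Int) := by omega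
  rw [e2, e1, PySem.List.pyGetD_natCast, PySem.List.pyGetD_natCast]

theorem loopB (s : List Int) (r : Int) :
    (PySem.List.pyRange 2 (s.length : Int) 1).foldl
      (fun res i => max res (PySem.List.pyGetD s i 0 - PySem.List.pyGetD s (i - 2) 0)) r
    = (strideD s).foldl max r := by
  rw [PySem.List.pyRange_one, List.foldl_map, strideD_eq_map, List.foldl_map]
  have hn : ((s.length : Int) - 2).toNat = s.length - 2 := by omega
  rw [hn]
  congr 1
  funext acc k
  have e1 : (2 : Int) + (k : Int) = ((k + 2 : Nat) : Int) := by omega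
  have e2 : (2 : Int) + (k : Int) - 2 = ((k : Nat) : Int) := by omega
  rw [e2, e1, PySem.List.pyGetD_natCast, PySem.List.pyGetD_natCast]

-- ===== VERDICT (by name: the statement is the Claim_ definition above) =====
theorem minOverallAwkwardness_spec : Claim_equal_minOverallAwkwardness := by
  intro arr _hdom hpre
  unfold Spec_minOverallAwkwardness minOverallAwkwardness minOverallAwkwardness_alt
  dsimp only
  set s := PySem.List.sorted arr (fun x => x) with hs
  have hsne : s ≠ [] := by
    rw [hs, Ne, PySem.List.sorted_eq_nil_iff]; exact hpre
  have hsp : s.Pairwise (· ≤ ·) := by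
    have := PySem.List.sorted_pairwise arr (fun x => x)
    simpa [hs] using this
  rw [slice_even, slice_odd, PySem.List.slice?_none_none_neg_one]
  simp only [Option.getD_some, zig_eq]
  match s, hsne, hsp with
  | [a], _, _ => simp [zig]
  | a :: b :: t, _, hsp =>
    have hab : a ≤ b := by
      simp only [List.pairwise_cons] at hsp
      exact hsp.1 b (by simp)
    have hzc : zig (a :: b :: t) = (a :: zig t) ++ [b] := by simp [zig]
    have hz0 : PySem.List.pyGetD (zig (a :: b :: t)) 0 0 = a := by
      obtain ⟨r, hr⟩ := zig_cons_eq a (b :: t)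
      rw [hr, PySem.List.pyGetD_zero_cons]
    have hzl : PySem.List.pyGetD (zig (a :: b :: t)) (-1) 0 = b := by
      rw [hzc, PySem.List.pyGetD_neg_one_append_singleton]
    rw [hz0, hzl, abs_of_nonneg (by omega : (0:Int) ≤ b - a), loopA, if_neg (by simp)]
    have e1 : PySem.List.pyGetD (a :: b :: t) 1 0 = b := by
      rw [show (1 : Int) = ((1 : Nat) : Int) by norm_num, PySem.List.pyGetD_natCast]
      rfl
    have e0 : PySem.List.pyGetD (a :: b :: t) 0 0 = a := PySem.List.pyGetD_zero_cons a (b :: t) 0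
    have hlen : 2 ≤ (a :: b :: t).length := by simp
    have en1 : PySem.List.pyGetD (a :: b :: t) (-1) 0
        = (a :: b :: t).getD ((a :: b :: t).length - 1) 0 := by
      rw [PySem.List.pyGetD_neg_ofNat _ 1 0 (by omega) (by omega),
        List.getD_eq_getElem _ _ (by omega)]
    have en2 : PySem.List.pyGetD (a :: b :: t) (-2) 0
        = (a :: b :: t).getD ((a :: b :: t).length - 2) 0 := by
      rw [PySem.List.pyGetD_neg_ofNat _ 2 0 (by omega) (by omega),
        List.getD_eq_getElem _ _ (by omega)]
    rw [e1, e0, en1, en2, ← lastD_eq _ hlen, loopB]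
    have hperm := key_perm t a b hsp
    exact hperm.foldl_eq (b - a)
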